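-- pv_equiv track=rewrite | github.com/avagyanie/PYTHON_COURSE | Signal_32.py | solution
-- ===== SOURCE A (Python) =====
-- def solution(a):
--
--     lst = []
--     for x in a:
--         summary = 0
--         for y in range(len(a)):
--             rep = abs(a[y] - x)
--             summary += rep
--         lst.append(summary)
--     ind = lst.index(min(lst))
--     return a[ind]
-- ===== SOURCE B (Python) =====
-- def solution(a):
--     s = sorted(a)
--     n = len(s)
--     cost = {}
--     c = sum(s) - n * s[0]
--     cost[s[0]] = c
--     for i in range(1, n):
--         c += (s[i] - s[i - 1]) * (2 * i - n)
--         cost[s[i]] = c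
--     best_c = None
--     best_x = None
--     for x in a:
--         cx = cost[x]
--         if best_c is None or cx < best_c:
--             best_c = cx
--             best_x = x
--     return best_x
-- ===== Notes on version B (the rewrite author's own statement) =====
-- stated objective: faster
-- what changed: A computes each element's sum of absolute differences with a nested O(n^2) scan and then takes lst.index(min(lst)); B sorts once, derives every distinct value's cost from the previous one by the constant-time recurrence c += (s[i]-s[i-1])*(2*i-n) into a value->cost dict, and picks the first minimizer in one streaming pass.
import Mathlib
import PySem

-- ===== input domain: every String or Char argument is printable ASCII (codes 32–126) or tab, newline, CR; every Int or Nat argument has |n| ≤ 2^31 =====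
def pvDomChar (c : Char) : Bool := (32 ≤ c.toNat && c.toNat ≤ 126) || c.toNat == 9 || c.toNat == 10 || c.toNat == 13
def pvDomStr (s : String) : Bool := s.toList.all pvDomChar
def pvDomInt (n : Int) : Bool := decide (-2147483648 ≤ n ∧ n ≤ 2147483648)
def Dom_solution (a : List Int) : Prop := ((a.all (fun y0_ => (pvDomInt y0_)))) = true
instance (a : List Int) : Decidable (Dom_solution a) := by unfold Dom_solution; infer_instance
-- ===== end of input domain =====

-- ===== PORT A =====
-- B changes the O(n^2) all-pairs abs-diff summation into sort + an incremental cost recurrence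
-- with a value->cost dict and a single streaming first-argmin pass.
def solution (a : List Int) : Int :=
  let lst := a.foldl (fun lst x =>
      lst ++ [(PySem.List.pyRange 0 (a.length : Int) 1).foldl
                (fun summary y => summary + |PySem.List.pyGetD a y 0 - x|) 0]) []
  match PySem.List.min? lst (fun v => v) with
  | none => 0   -- min([]) raises ValueError: excluded by Pre_solution
  | some m =>
      match PySem.List.index? lst m with
      | none => 0  -- unreachable: m is a member of lst
      | some ind => (PySem.List.pyGet? a (ind : Int)).getD 0

-- ===== PORT B =====
def solution_alt (a : List Int) : Int :=
  let s := PySem.List.sorted a (fun v => v) false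
  let n : Int := s.length
  let c0 := s.sum - n * PySem.List.pyGetD s 0 0   -- s[0] raises IndexError on []: excluded by Pre_solution
  let st0 := (PySem.Dict.empty.insert (PySem.List.pyGetD s 0 0) c0, c0)
  let cost := ((PySem.List.pyRange 1 n 1).foldl
      (fun st i =>
        let c := st.2 + (PySem.List.pyGetD s i 0 - PySem.List.pyGetD s (i - 1) 0) * (2 * i - n)
        (st.1.insert (PySem.List.pyGetD s i 0) c, c)) st0).1
  (a.foldl (fun st x =>
      let cx := cost.getD x 0   -- cost[x]; exact: every x in a is a key of cost
      match st.1 with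
      | none => (some cx, x)
      | some b => if cx < b then (some cx, x) else st)
    ((none : Option Int), (0 : Int))).2

-- ===== PRECONDITION & SPEC =====
-- Pre_solution: A raises ValueError (min of empty sequence) on the empty list.
def Pre_solution (a : List Int) : Prop := a ≠ []
instance (a : List Int) : Decidable (Pre_solution a) := by unfold Pre_solution; infer_instance
def pvWitness_solution : List Int := ([3, 1, 2] : List Int)
def Spec_solution (a : List Int) (out : Int) : Prop := out = solution_alt a
instance (a : List Int) (out : Int) : Decidable (Spec_solution a out) := by unfold Spec_solution; infer_instance

-- ===== CLAIM (what is proved, stated in full; the proofs are below) =====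
def Claim_equal_solution : Prop := ∀ (a : List Int), Dom_solution a → Pre_solution a → Spec_solution a (solution a)

def pvSel (f : Int → Int) (b bx : Int) : List Int → Int × Int
  | [] => (b, bx)
  | x :: t => if f x < b then pvSel f (f x) x t else pvSel f b bx t

-- ===== LEMMAS AND PROOFS =====

-- the quantity both programs compute for each element x: the sum over a of |v - x|
def pvCost (l : List Int) (x : Int) : Int := (l.map (fun v => |v - x|)).sum

lemma pvCost_all_le (l : List Int) (x : Int) (h : ∀ v ∈ l, v ≤ x) :
    pvCost l x = (l.length : Int) * x - l.sum := by
  induction l with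
  | nil => simp [pvCost]
  | cons v t ih =>
    have hv : v ≤ x := h v (by simp)
    have := ih (fun w hw => h w (by simp [hw]))
    simp only [pvCost, List.map_cons, List.sum_cons, List.length_cons] at *
    rw [abs_of_nonpos (by omega)]
    rw [this]; push_cast; ring

lemma pvCost_all_ge (l : List Int) (x : Int) (h : ∀ v ∈ l, x ≤ v) :
    pvCost l x = l.sum - (l.length : Int) * x := by
  induction l with
  | nil => simp [pvCost]
  | cons v t ih =>
    have hv : x ≤ v := h v (by simp)
    have := ih (fun w hw => h w (by simp [hw]))
    simp only [pvCost, List.map_cons, List.sum_cons, List.length_cons] at *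
    rw [abs_of_nonneg (by omega)]
    rw [this]; push_cast; ring

-- A's lst is pvCost mapped over a
lemma lst_eq_map (a : List Int) :
    a.foldl (fun lst x =>
      lst ++ [(PySem.List.pyRange 0 (a.length : Int) 1).foldl
                (fun summary y => summary + |PySem.List.pyGetD a y 0 - x|) 0]) []
    = a.map (fun x => pvCost a x) := by
  rw [PySem.List.foldl_append_singleton_eq_map]
  simp only [List.nil_append]
  apply List.map_congr_left
  intro x hx
  rw [PySem.List.foldl_pyRange_zero_pyGetD' a 0 (fun summary v => summary + |v - x|) 0]
  rw [PySem.List.foldl_add]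
  simp [pvCost]

lemma index?_eq_some_idxOf (l : List Int) (m : Int) (h : m ∈ l) :
    PySem.List.index? l m = some (l.idxOf m) := by
  rw [PySem.List.index?_eq_idxOf?]
  induction l with
  | nil => simp at h
  | cons x t ih =>
    by_cases hx : x = m
    · subst hx; simp [List.idxOf?_cons]
    · rcases List.mem_cons.1 h with h1 | h1
      · exact absurd h1.symm hx
      · simp only [List.idxOf?_cons, beq_iff_eq, hx, ih h1]
        have hxm : (x == m) = false := by simp [hx]
        simp [List.idxOf_cons, hxm]

lemma take_le (s : List Int) (hs : s.Pairwise (· ≤ ·)) (i : Nat) (hi : i < s.length) :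
    ∀ v ∈ s.take i, v ≤ s[i] := by
  intro v hv
  obtain ⟨j, hj, hvj⟩ := List.getElem_of_mem hv
  have hj' : j < i := by simpa using hj.trans_le (by simp)
  rw [← hvj, List.getElem_take]
  exact List.pairwise_iff_getElem.1 hs j i (by omega) hi (by omega)

lemma drop_ge (s : List Int) (hs : s.Pairwise (· ≤ ·)) (i : Nat) (hi : i ≤ s.length) :
    ∀ v ∈ s.drop i, s.getD i 0 ≤ v := by
  intro v hv
  obtain ⟨j, hj, hvj⟩ := List.getElem_of_mem hv
  rw [← hvj, List.getElem_drop]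
  have hlen : i + j < s.length := by simp at hj; omega
  rw [List.getD_eq_getElem s 0 (by omega)]
  rcases Nat.eq_zero_or_pos j with h0 | h0
  · subst h0; simp
  · exact List.pairwise_iff_getElem.1 hs i (i+j) (by omega) hlen (by omega)

lemma pvCost_closed (s : List Int) (hs : s.Pairwise (· ≤ ·)) (i : Nat) (hi : i < s.length) :
    pvCost s s[i] =
      (i : Int) * s[i] - (s.take i).sum + ((s.drop i).sum - ((s.length : Int) - i) * s[i]) := by
  have hsplit : pvCost s s[i] = pvCost (s.take i) s[i] + pvCost (s.drop i) s[i] := by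
    rw [pvCost, pvCost, pvCost, ← List.sum_append, ← List.map_append, List.take_append_drop]
  rw [hsplit, pvCost_all_le _ _ (take_le s hs i hi),
      pvCost_all_ge _ _ (by
        have := drop_ge s hs i (le_of_lt hi)
        rwa [List.getD_eq_getElem s 0 hi] at this)]
  have h1 : ((s.take i).length : Int) = i := by
    simp; omega
  have h2 : ((s.drop i).length : Int) = (s.length : Int) - i := by
    simp; omega
  rw [h1, h2]
  try ring

lemma pvCost_rec (s : List Int) (hs : s.Pairwise (· ≤ ·)) (k : Nat) (hk : k + 1 < s.length) :
    pvCost s s[k+1] =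
      pvCost s s[k] + (s[k+1] - s[k]) * (2 * ((k:Int)+1) - (s.length : Int)) := by
  rw [pvCost_closed s hs (k+1) hk, pvCost_closed s hs k (by omega)]
  have htake : (s.take (k+1)).sum = (s.take k).sum + s[k] := by
    rw [List.take_add_one, List.getElem?_eq_getElem (by omega : k < s.length)]
    rw [Option.toList_some, List.sum_append, List.sum_cons, List.sum_nil, add_zero]
  have hdrop : (s.drop k).sum = s[k] + (s.drop (k+1)).sum := by
    rw [List.drop_eq_getElem_cons (by omega : k < s.length), List.sum_cons]
  rw [htake, hdrop]
  push_cast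
  ring

-- B's dict-building loop, abstracted
def pvStep (s : List Int) (st : PySem.Dict Int Int × Int) (i : Int) : PySem.Dict Int Int × Int :=
  let c := st.2 + (PySem.List.pyGetD s i 0 - PySem.List.pyGetD s (i - 1) 0) * (2 * i - (s.length : Int))
  (st.1.insert (PySem.List.pyGetD s i 0) c, c)

def pvInit (s : List Int) : PySem.Dict Int Int × Int :=
  (PySem.Dict.empty.insert (PySem.List.pyGetD s 0 0) (s.sum - (s.length : Int) * PySem.List.pyGetD s 0 0),
   s.sum - (s.length : Int) * PySem.List.pyGetD s 0 0)

lemma pvInv (s : List Int) (hs : s.Pairwise (· ≤ ·)) (hne : s ≠ [])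
    (k : Nat) (hk1 : 1 ≤ k) (hk : k ≤ s.length) :
    ((PySem.List.pyRange 1 (k:Int) 1).foldl (pvStep s) (pvInit s)).2 = pvCost s (s.getD (k-1) 0)
    ∧ ∀ x ∈ s.take k,
        ((PySem.List.pyRange 1 (k:Int) 1).foldl (pvStep s) (pvInit s)).1.get? x
          = some (pvCost s x) := by
  induction k, hk1 using Nat.le_induction with
  | base =>
    rw [PySem.List.pyRange_one_eq_nil (by omega)]
    have hlen : 0 < s.length := List.length_pos_iff.mpr hne
    have hget : PySem.List.pyGetD s 0 0 = s.getD 0 0 := by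
      simpa using PySem.List.pyGetD_natCast s 0 0
    have hc0 : s.sum - (s.length : Int) * s.getD 0 0 = pvCost s (s.getD 0 0) := by
      rw [pvCost_all_ge s _ (by simpa using drop_ge s hs 0 (by omega))]
    constructor
    · simp only [List.foldl_nil, pvInit, hget]
      exact hc0
    · intro x hx
      have : x = s.getD 0 0 := by
        rcases s with _ | ⟨h, t⟩
        · simp at hx
        · simp at hx ⊢; simpa using hx
      subst this
      simp only [pvInit, List.foldl_nil, hget]
      rw [PySem.Dict.get?_insert_self]
      exact congrArg some hc0
  | succ k hk1 ih =>
    have hklen : k < s.length := by omega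
    obtain ⟨ih2, ihd⟩ := ih (by omega)
    have hsplit : PySem.List.pyRange 1 ((k+1 : Nat) : Int) 1
        = PySem.List.pyRange 1 (k : Int) 1 ++ [(k : Int)] := by
      push_cast
      exact PySem.List.pyRange_one_succ_right (by exact_mod_cast hk1)
    rw [hsplit, List.foldl_append]
    have hgk : PySem.List.pyGetD s (k : Int) 0 = s.getD k 0 := by
      simp
    have hgk1 : PySem.List.pyGetD s ((k : Int) - 1) 0 = s.getD (k-1) 0 := by
      have h : ((k : Int) - 1) = ((k - 1 : Nat) : Int) := by omega
      rw [h]; simp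
    obtain ⟨j, rfl⟩ : ∃ j, k = j + 1 := ⟨k - 1, by omega⟩
    have hcval : (List.foldl (pvStep s) (pvInit s) (PySem.List.pyRange 1 (↑(j+1) : Int) 1)).2
        + (PySem.List.pyGetD s (↑(j+1) : Int) 0 - PySem.List.pyGetD s ((↑(j+1) : Int) - 1) 0)
          * (2 * (↑(j+1) : Int) - (s.length : Int))
        = pvCost s (s.getD (j+1) 0) := by
      rw [ih2, hgk, hgk1]
      simp only [Nat.add_sub_cancel]
      rw [List.getD_eq_getElem s 0 (show j+1 < s.length by omega),
          List.getD_eq_getElem s 0 (show j < s.length by omega),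
          pvCost_rec s hs j (by omega)]
      push_cast
      ring
    constructor
    · simp only [List.foldl_cons, List.foldl_nil, pvStep, hcval, Nat.add_sub_cancel]
    · intro x hx
      simp only [List.foldl_cons, List.foldl_nil, pvStep]
      rw [PySem.Dict.get?_insert]
      rw [List.take_add_one, List.getElem?_eq_getElem (by omega : j + 1 < s.length)] at hx
      have hget : PySem.List.pyGetD s (↑(j+1) : Int) 0 = s[j+1] := by
        rw [hgk]; exact List.getD_eq_getElem s 0 (by omega)
      by_cases hxe : x = PySem.List.pyGetD s (↑(j+1) : Int) 0
      · rw [if_pos hxe, hcval, hxe, hget,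
            List.getD_eq_getElem s 0 (by omega : j + 1 < s.length)]
      · rw [if_neg hxe]
        apply ihd
        rcases List.mem_append.1 hx with h | h
        · exact h
        · exfalso; apply hxe
          simp at h
          rw [h, hget]

lemma foldl_step_eq_pvSel (g f : Int → Int) (t : List Int) (hgf : ∀ x ∈ t, g x = f x) : ∀ b bx,
    t.foldl (fun st x =>
      match st.1 with
      | none => (some (g x), x)
      | some bb => if g x < bb then (some (g x), x) else st)
      ((some b : Option Int), bx)
    = (some (pvSel f b bx t).1, (pvSel f b bx t).2) := by
  induction t with
  | nil => intro b bx; simp [pvSel]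
  | cons x t ih =>
    intro b bx
    have hx0 : g x = f x := hgf x (by simp)
    simp only [List.foldl_cons, pvSel, hx0]
    by_cases hlt : f x < b
    · simp [hlt, ih (fun y hy => hgf y (by simp [hy]))]
    · simp [hlt, ih (fun y hy => hgf y (by simp [hy]))]

lemma pvSel_spec (f : Int → Int) (t : List Int) : ∀ b bx, f bx = b →
    pvSel f b bx t =
      ((t.map f).foldl min b,
       (bx :: t).getD ((f bx :: t.map f).idxOf ((t.map f).foldl min b)) 0) := by
  induction t with
  | nil =>
    intro b bx hb
    simp [pvSel, hb, List.idxOf_cons_self]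
  | cons x t ih =>
    intro b bx hb
    have hle := PySem.List.foldl_min_le (t.map f)
    simp only [pvSel, List.map_cons, List.foldl_cons]
    by_cases hlt : f x < b
    · rw [if_pos hlt, ih (f x) x rfl]
      have hmin : min b (f x) = f x := by omega
      rw [hmin]
      have hm : (t.map f).foldl min (f x) ≤ f x := (hle (f x)).1
      have hne : f bx ≠ (t.map f).foldl min (f x) := by omega
      rw [List.idxOf_cons_ne _ hne, List.getD_cons_succ]
    · rw [if_neg hlt, ih b bx hb]
      have hmin : min b (f x) = b := by omega
      rw [hmin]
      set m := (t.map f).foldl min b with hmdef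
      have hm : m ≤ b := (hle b).1
      by_cases hmb : m = f bx
      · rw [hmb, List.idxOf_cons_self, List.idxOf_cons_self]
        simp
      · have hmx : m ≠ f x := by omega
        rw [List.idxOf_cons_ne _ (Ne.symm hmb), List.idxOf_cons_ne _ (Ne.symm hmb),
            List.idxOf_cons_ne _ (Ne.symm hmx), List.getD_cons_succ, List.getD_cons_succ,
            List.getD_cons_succ]

-- B's port, with its dict-building loop named (zeta-definitional)
lemma alt_eq (a : List Int) : solution_alt a =
    (a.foldl (fun st x =>
        match st.1 with
        | none => (some ((((PySem.List.pyRange 1 (((PySem.List.sorted a (fun v => v) false).length : Int)) 1).foldl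
            (pvStep (PySem.List.sorted a (fun v => v) false))
            (pvInit (PySem.List.sorted a (fun v => v) false))).1).getD x 0), x)
        | some b => if (((PySem.List.pyRange 1 (((PySem.List.sorted a (fun v => v) false).length : Int)) 1).foldl
            (pvStep (PySem.List.sorted a (fun v => v) false))
            (pvInit (PySem.List.sorted a (fun v => v) false))).1).getD x 0 < b
            then (some ((((PySem.List.pyRange 1 (((PySem.List.sorted a (fun v => v) false).length : Int)) 1).foldl
            (pvStep (PySem.List.sorted a (fun v => v) false))
            (pvInit (PySem.List.sorted a (fun v => v) false))).1).getD x 0), x) else st)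
      ((none : Option Int), (0 : Int))).2 := rfl

lemma main_eq (a : List Int) (ha : a ≠ []) : solution a = solution_alt a := by
  obtain ⟨x0, t, rfl⟩ := List.exists_cons_of_ne_nil ha
  set f : Int → Int := fun x => pvCost (x0 :: t) x with hf
  set s := PySem.List.sorted (x0 :: t) (fun v => v) false with hsdef
  have hs : s.Pairwise (· ≤ ·) := PySem.List.sorted_pairwise (x0 :: t) (fun v => v)
  have hsperm : s.Perm (x0 :: t) := PySem.List.sorted_perm (x0 :: t) (fun v => v) false
  have hlen : s.length = (x0 :: t).length := hsperm.length_eq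
  have hsne : s ≠ [] := by
    intro h
    rw [h] at hlen
    simp at hlen
  obtain ⟨-, hd⟩ := pvInv s hs hsne s.length (by rw [hlen]; simp) le_rfl
  have hcost : ∀ x ∈ (x0 :: t),
      (((PySem.List.pyRange 1 ((s.length : Int)) 1).foldl (pvStep s) (pvInit s)).1).getD x 0
        = f x := by
    intro x hx
    have hxs : x ∈ s := (PySem.List.mem_sorted (x0 :: t) (fun v => v) false x).2 hx
    have h1 := hd x (by rw [List.take_length]; exact hxs)
    rw [PySem.Dict.getD_eq_get?_getD, h1, Option.getD_some]
    exact List.Perm.sum_eq (hsperm.map (fun v => |v - x|))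
  -- B side
  rw [alt_eq, ← hsdef]
  rw [List.foldl_cons]
  show _ = ((t.foldl _ ((some ((((PySem.List.pyRange 1 ((s.length : Int)) 1).foldl (pvStep s) (pvInit s)).1).getD x0 0) : Option Int), x0)).2)
  rw [hcost x0 (by simp)]
  rw [foldl_step_eq_pvSel
        (fun x => (((PySem.List.pyRange 1 ((s.length : Int)) 1).foldl (pvStep s) (pvInit s)).1).getD x 0)
        f t (fun x hx => hcost x (List.mem_cons_of_mem _ hx)) (f x0) x0,
      pvSel_spec f t (f x0) x0 rfl]
  -- A side
  simp only [solution, lst_eq_map, ← hf, List.map_cons]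
  rw [PySem.List.min?_id_cons]
  have hmem : (t.map f).foldl min (f x0) ∈ f x0 :: t.map f := by
    rcases PySem.List.foldl_min_mem (t.map f) (f x0) with h | h
    · rw [h]; exact List.mem_cons_self
    · exact List.mem_cons_of_mem _ h
  show (match PySem.List.index? (f x0 :: t.map f) ((t.map f).foldl min (f x0)) with
        | none => 0
        | some ind => (PySem.List.pyGet? (x0 :: t) (ind : Int)).getD 0)
      = (x0 :: t).getD (List.idxOf ((t.map f).foldl min (f x0)) (f x0 :: t.map f)) 0
  rw [index?_eq_some_idxOf _ _ hmem]
  show (PySem.List.pyGet? (x0 :: t)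
        ((List.idxOf ((t.map f).foldl min (f x0)) (f x0 :: t.map f) : Nat) : Int)).getD 0 = _
  rw [PySem.List.pyGet?_natCast]
  rw [← List.getD_eq_getElem?_getD]

-- ===== VERDICT (by name: the statement is the Claim_ definition above) =====
theorem solution_spec : Claim_equal_solution := by
  intro a _ hpre
  unfold Spec_solution
  exact main_eq a hpre
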